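-- pv_equiv track=rewrite | github.com/blueroutecn/Algorithm | Brute force/ALLERGY_greedy.py | checkfood
-- ===== SOURCE A (Python) =====
-- import operator
--
-- def checkfood(frdlist,cklist,nfood,nfriend):
--
--     flag = True
--     for f in frdlist:
--         if f==0:
--             flag = False
--     if flag:
--         return 0
--
--     bestfood = [0]*nfood
--     for i in range(0,nfood):
--         for j in range(0,nfriend):
--             if cklist[j][i] == 1 and frdlist[j] == 0:
--                 bestfood[i] = bestfood[i] + 1
--
--     max_index, max_value = max(enumerate(bestfood), key=operator.itemgetter(1))
--     selectfood = [idx for idx,item in enumerate(bestfood) if item == max_value]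
--
--     ret = 9999
--     for j in range(0,len(selectfood)):
--         foodidx = selectfood[j]
--         for i in range(0,nfriend):
--             frdlist[i] = frdlist[i] + cklist[i][foodidx]
--
--         tmp = 1 + checkfood(frdlist,cklist,nfood,nfriend)
--         ret = min(ret,tmp)
--
--         for i in range(0,nfriend):
--             frdlist[i] = frdlist[i] - cklist[i][foodidx]
--     return ret
-- ===== SOURCE B (Python) =====
-- def checkfood(frdlist, cklist, nfood, nfriend):
--     # DP on the set of unsatisfied friends: recursion keyed by the sorted tuple of
--     # still-unsatisfied indices, memoized in a dict; frdlist is never mutated.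
--     if all(f != 0 for f in frdlist):
--         return 0
--     cache = {}
--
--     def solve(unsat):
--         if not unsat:
--             return 0
--         if unsat in cache:
--             return cache[unsat]
--         counts = [sum(1 for j in unsat if cklist[j][i] == 1) for i in range(nfood)]
--         m = max(counts)
--         ret = min(1 + solve(tuple(j for j in unsat if cklist[j][i] != 1))
--                   for i in range(nfood) if counts[i] == m)
--         cache[unsat] = ret
--         return ret
--
--     return solve(tuple(j for j in range(nfriend) if frdlist[j] == 0))
-- ===== Notes on version B (the rewrite author's own statement) =====
-- stated objective: alternative
-- what changed: B replaces A's mutate-and-restore greedy recursion over the integer satisfaction counts by a memoized recursion on the tuple of still-unsatisfied friend indices (a dict cache keyed by that tuple), so each reachable unsatisfied-set is solved once and frdlist is never mutated.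
-- outside the precondition, e.g. on checkfood([0], [[2]], 1, 1): A returns 1, B raises RecursionError; on checkfood([-1, 0], [[1], [1]], 1, 2): A returns 2, B returns 1
import Mathlib
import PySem

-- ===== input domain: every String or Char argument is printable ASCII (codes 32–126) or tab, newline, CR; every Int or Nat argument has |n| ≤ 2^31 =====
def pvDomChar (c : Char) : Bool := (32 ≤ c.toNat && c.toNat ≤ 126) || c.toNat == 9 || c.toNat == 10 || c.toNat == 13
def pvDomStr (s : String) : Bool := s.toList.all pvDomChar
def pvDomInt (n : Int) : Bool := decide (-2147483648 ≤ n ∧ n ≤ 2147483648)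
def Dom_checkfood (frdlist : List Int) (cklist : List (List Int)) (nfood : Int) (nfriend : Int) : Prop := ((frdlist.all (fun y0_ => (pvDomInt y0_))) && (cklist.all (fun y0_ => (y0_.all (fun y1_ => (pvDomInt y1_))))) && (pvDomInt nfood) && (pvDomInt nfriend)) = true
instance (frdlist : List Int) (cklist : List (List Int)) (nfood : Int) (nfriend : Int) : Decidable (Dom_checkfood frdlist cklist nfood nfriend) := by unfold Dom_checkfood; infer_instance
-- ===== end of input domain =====

-- B replaces A's mutate-and-restore greedy recursion on the integer counts by a
-- memoized recursion on the list of still-unsatisfied friend indices (objective: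
-- alternative — dict-cached dynamic programming on the unsatisfied-set; A's
-- in-place mutation of frdlist is always undone before A returns, so only the
-- return value is at stake).

-- ===== PORT A =====
-- flag = True; for f in frdlist: if f == 0: flag = False
def pvFlagA (frdlist : List Int) : Bool :=
  frdlist.foldl (fun flag f => if f = 0 then false else flag) true

-- the nested loops building bestfood ([0]*nfood, then += 1 per covering pair)
def pvBestfood (cklist : List (List Int)) (nfood nfriend : Int) (frdlist : List Int) : List Int :=
  (PySem.List.pyRange 0 nfood 1).foldl
    (fun bf i =>
      (PySem.List.pyRange 0 nfriend 1).foldl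
        (fun bf j =>
          if PySem.List.pyGetD (PySem.List.pyGetD cklist j []) i 0 = 1 ∧
             PySem.List.pyGetD frdlist j 0 = 0
          then PySem.List.pySetD bf i (PySem.List.pyGetD bf i 0 + 1) else bf)
        bf)
    (PySem.List.pyRepeat [(0 : Int)] nfood)

-- for i in range(0, nfriend): frdlist[i] = frdlist[i] + cklist[i][foodidx]
-- (A mutates frdlist and subtracts the same column afterwards; functionally the
-- restoration is the unchanged original list, which the loop over selectfood reuses)
def pvAddFood (cklist : List (List Int)) (nfriend foodidx : Int) (frdlist : List Int) : List Int :=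
  (PySem.List.pyRange 0 nfriend 1).foldl
    (fun fl i =>
      PySem.List.pySetD fl i
        (PySem.List.pyGetD fl i 0 + PySem.List.pyGetD (PySem.List.pyGetD cklist i []) foodidx 0))
    frdlist

-- A's recursion, fuel-indexed for totality; the fuel is a totality device only:
-- under Pre_ the recursion depth is bounded by the number of unsatisfied friends,
-- so the fuel supplied by `checkfood` is never exhausted.
def checkfoodGo (cklist : List (List Int)) (nfood nfriend : Int) : Nat → List Int → Int
  | 0, _ => 0
  | fuel+1, frdlist =>
    if pvFlagA frdlist then 0
    else
      let bestfood := pvBestfood cklist nfood nfriend frdlist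
      -- max(enumerate(bestfood), key=itemgetter(1)); only max_value is used.
      -- Python raises ValueError on an empty bestfood; the .getD 0 is unreached under Pre_
      let maxValue := ((PySem.List.max? (PySem.List.enumerate bestfood) (fun p => p.2)).map
        (fun p => p.2)).getD 0
      let selectfood := (PySem.List.enumerate bestfood).filterMap
        (fun p => if p.2 = maxValue then some p.1 else none)
      selectfood.foldl
        (fun ret foodidx =>
          min ret (1 + checkfoodGo cklist nfood nfriend fuel
            (pvAddFood cklist nfriend foodidx frdlist)))
        9999

def checkfood (frdlist : List Int) (cklist : List (List Int)) (nfood : Int) (nfriend : Int) : Int :=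
  checkfoodGo cklist nfood nfriend (frdlist.countP (fun f => f == 0) + 1) frdlist

-- ===== PORT B =====
-- tuple(j for j in range(nfriend) if frdlist[j] == 0)
def pvUnsat (frdlist : List Int) (nfriend : Int) : List Int :=
  (PySem.List.pyRange 0 nfriend 1).filter (fun j => PySem.List.pyGetD frdlist j 0 == 0)

-- sum(1 for j in unsat if cklist[j][i] == 1)
def pvCover (cklist : List (List Int)) (i : Int) (unsat : List Int) : Int :=
  ((unsat.filter (fun j =>
      PySem.List.pyGetD (PySem.List.pyGetD cklist j []) i 0 == 1)).length : Int)

-- tuple(j for j in unsat if cklist[j][i] != 1)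
def pvRemove (cklist : List (List Int)) (i : Int) (unsat : List Int) : List Int :=
  unsat.filter (fun j => PySem.List.pyGetD (PySem.List.pyGetD cklist j []) i 0 != 1)

-- B's memoized solve, threading the cache; fuel is a totality device only — the
-- state list strictly shrinks under Pre_, so the fuel supplied below never runs out.
def solveGo (cklist : List (List Int)) (nfood : Int) :
    Nat → PySem.Dict (List Int) Int → List Int → Int × PySem.Dict (List Int) Int
  | 0, cache, _ => (0, cache)
  | fuel+1, cache, unsat =>
    if unsat = [] then (0, cache)
    else
      match cache.get? unsat with
      | some v => (v, cache)
      | none =>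
        let counts := (PySem.List.pyRange 0 nfood 1).map (fun i => pvCover cklist i unsat)
        -- max(counts): Python raises on an empty list; .getD 0 unreached under Pre_
        let m := (PySem.List.max? counts (fun x => x)).getD 0
        let folded := ((PySem.List.pyRange 0 nfood 1).filter
            (fun i => PySem.List.pyGetD counts i 0 == m)).foldl
          (fun (acc : List Int × PySem.Dict (List Int) Int) i =>
            let r := solveGo cklist nfood fuel acc.2 (pvRemove cklist i unsat)
            (acc.1 ++ [1 + r.1], r.2))
          ([], cache)
        let ret := (PySem.List.min? folded.1 (fun x => x)).getD 0
        (ret, folded.2.insert unsat ret)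

def checkfood_alt (frdlist : List Int) (cklist : List (List Int)) (nfood : Int) (nfriend : Int) : Int :=
  if frdlist.all (fun f => f != 0) then 0
  else
    let unsat := pvUnsat frdlist nfriend
    (solveGo cklist nfood (unsat.length + 1) PySem.Dict.empty unsat).1

-- ===== PRECONDITION & SPEC =====
-- Pre_ admits every input with no unsatisfied friend (A returns 0 there whatever the
-- other arguments look like), and otherwise exactly the well-shaped instances of the
-- problem: frdlist/cklist of length nfriend, rows of length nfood ≥ 1 with 0/1
-- entries, nonnegative satisfaction counts, and every unsatisfied friend liked by at
-- least one food.  The excluded inputs are those where Python A raises (IndexError /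
-- ValueError) or recurses forever, plus two kinds on which A still returns: cklist
-- entries outside {0,1} or negative frdlist entries (B's recursion diverges or
-- disagrees there — A's value comes from satisfied friends being pushed back to 0,
-- an artefact of its counting), and inputs with more than 9998 unsatisfied friends,
-- where A's 9999 sentinel could cap the result (the proof uses this bound).
def Pre_checkfood (frdlist : List Int) (cklist : List (List Int)) (nfood : Int) (nfriend : Int) : Prop :=
  (∀ f ∈ frdlist, f ≠ 0) ∨
  ((frdlist.length : Int) = nfriend ∧ (cklist.length : Int) = nfriend ∧ 1 ≤ nfood ∧
   (∀ f ∈ frdlist, 0 ≤ f) ∧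
   (∀ row ∈ cklist, (row.length : Int) = nfood ∧ ∀ x ∈ row, x = 0 ∨ x = 1) ∧
   (∀ p ∈ frdlist.zip cklist, p.1 = 0 → (1 : Int) ∈ p.2) ∧
   frdlist.countP (fun f => f == 0) ≤ 9998)
instance (frdlist : List Int) (cklist : List (List Int)) (nfood : Int) (nfriend : Int) : Decidable (Pre_checkfood frdlist cklist nfood nfriend) := by unfold Pre_checkfood; infer_instance

def pvWitness_checkfood : List Int × List (List Int) × Int × Int :=
  ([0, 1, 0], [[1, 0], [0, 1], [1, 1]], 2, 3)

def Spec_checkfood (frdlist : List Int) (cklist : List (List Int)) (nfood : Int) (nfriend : Int) (out : Int) : Prop := out = checkfood_alt frdlist cklist nfood nfriend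
instance (frdlist : List Int) (cklist : List (List Int)) (nfood : Int) (nfriend : Int) (out : Int) : Decidable (Spec_checkfood frdlist cklist nfood nfriend out) := by unfold Spec_checkfood; infer_instance

-- ===== CLAIM (what is proved, stated in full; the proofs are below) =====
def Claim_equal_checkfood : Prop := ∀ (frdlist : List Int) (cklist : List (List Int)) (nfood : Int) (nfriend : Int), Dom_checkfood frdlist cklist nfood nfriend → Pre_checkfood frdlist cklist nfood nfriend → Spec_checkfood frdlist cklist nfood nfriend (checkfood frdlist cklist nfood nfriend)

-- ===== LEMMAS AND PROOFS =====

-- the cache-free core recursion both ports compute (on the unsatisfied-index list)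
def specGo (cklist : List (List Int)) (nfood : Int) : Nat → List Int → Int
  | 0, _ => 0
  | fuel+1, unsat =>
    if unsat = [] then 0
    else
      let m := (PySem.List.max? ((PySem.List.pyRange 0 nfood 1).map
        (fun i => pvCover cklist i unsat)) (fun x => x)).getD 0
      let ties := (PySem.List.pyRange 0 nfood 1).filter
        (fun i => pvCover cklist i unsat == m)
      (PySem.List.min? (ties.map (fun i => 1 + specGo cklist nfood fuel (pvRemove cklist i unsat)))
        (fun x => x)).getD 0

-- well-formed 0/1 matrix with rows of length nfood
def CkOK (cklist : List (List Int)) (nfood : Int) : Prop :=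
  ∀ row ∈ cklist, (row.length : Int) = nfood ∧ ∀ x ∈ row, x = 0 ∨ x = 1

-- every listed friend is covered by some food
def Cov (cklist : List (List Int)) (nfood : Int) (unsat : List Int) : Prop :=
  ∀ j ∈ unsat, ∃ i, 0 ≤ i ∧ i < nfood ∧
    PySem.List.pyGetD (PySem.List.pyGetD cklist j []) i 0 = 1

-- ===== scratch: basic lemmas =====
lemma pvFlagA_eq (fl : List Int) : pvFlagA fl = fl.all (fun f => f != 0) := by
  unfold pvFlagA
  suffices h : ∀ b : Bool, fl.foldl (fun flag f => if f = 0 then false else flag) b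
      = (b && fl.all (fun f => f != 0)) by simpa using h true
  induction fl with
  | nil => intro b; simp
  | cons x xs ih =>
    intro b
    rw [List.foldl_cons, ih]
    by_cases hx : x = 0
    · simp [hx]
    · have hb : (x != 0) = true := by simpa using hx
      simp [hx, hb]

lemma length_pvUnsat (fl : List Int) (nfr : Int) (h : (fl.length : Int) = nfr) :
    (pvUnsat fl nfr).length = fl.countP (fun f => f == 0) := by
  unfold pvUnsat
  rw [← h]
  have hmap : (PySem.List.pyRange 0 (fl.length : Int) 1).map (fun j => PySem.List.pyGetD fl j 0) = fl := by
    simpa using PySem.List.map_pyGetD_pyRange_zero fl 0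
  calc ((PySem.List.pyRange 0 (fl.length : Int) 1).filter
          (fun j => PySem.List.pyGetD fl j 0 == 0)).length
      = (PySem.List.pyRange 0 (fl.length : Int) 1).countP
          (fun j => PySem.List.pyGetD fl j 0 == 0) := by
        rw [List.countP_eq_length_filter]
    _ = ((PySem.List.pyRange 0 (fl.length : Int) 1).map (fun j => PySem.List.pyGetD fl j 0)).countP
          (fun f => f == 0) := by rw [List.countP_map]; rfl
    _ = fl.countP (fun f => f == 0) := by rw [hmap]

lemma pvUnsat_eq_nil_iff (fl : List Int) (nfr : Int) (h : (fl.length : Int) = nfr) :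
    pvUnsat fl nfr = [] ↔ ∀ f ∈ fl, f ≠ 0 := by
  have hlen := length_pvUnsat fl nfr h
  constructor
  · intro he f hf hf0
    have h0 : fl.countP (fun f => f == 0) = 0 := by rw [← hlen, he]; rfl
    have := List.countP_eq_zero.1 h0 f hf
    simp [hf0] at this
  · intro hall
    have h0 : fl.countP (fun f => f == 0) = 0 :=
      List.countP_eq_zero.2 (by intro f hf; simpa using hall f hf)
    have hz : (pvUnsat fl nfr).length = 0 := by rw [hlen, h0]
    exact List.eq_nil_of_length_eq_zero hz

lemma max?_enumerate_snd (xs : List Int) :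
    (PySem.List.max? (PySem.List.enumerate xs) (fun p => p.2)).map (fun p => p.2)
      = PySem.List.max? xs (fun x => x) := by
  conv_rhs => rw [← PySem.List.map_snd_enumerate xs 0]
  simp only [PySem.List.max?, List.foldl_map]
  rw [show (none : Option Int) = Option.map (fun (p : Int × Int) => p.2) none from rfl]
  rw [List.foldl_hom (Option.map (fun (p : Int × Int) => p.2))]
  intro acc y
  cases acc
  · simp
  · simp; split <;> simp

-- how many friends in [0,nfriend) are unsatisfied and covered by food i
def pvCnt (cklist : List (List Int)) (frdlist : List Int) (nfriend i : Int) : Int :=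
  ((PySem.List.pyRange 0 nfriend 1).countP (fun j =>
     decide (PySem.List.pyGetD (PySem.List.pyGetD cklist j []) i 0 = 1 ∧
             PySem.List.pyGetD frdlist j 0 = 0)) : Int)

lemma incr_loop (P : Int → Prop) [DecidablePred P] (L : List Int) :
    ∀ (bf : List Int) (i : Nat), i < bf.length →
    L.foldl (fun bf j => if P j
        then PySem.List.pySetD bf (i : Int) (PySem.List.pyGetD bf (i : Int) 0 + 1) else bf) bf
      = bf.set i (bf.getD i 0 + (L.countP (fun j => decide (P j)) : Int)) := by
  induction L with
  | nil =>
    intro bf i hi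
    simp only [List.foldl_nil, List.countP_nil, Nat.cast_zero, add_zero]
    rw [List.getD_eq_getElem bf 0 hi]
    exact (List.set_getElem_self hi).symm
  | cons x L ih =>
    intro bf i hi
    rw [List.foldl_cons]
    by_cases hx : P x
    · rw [if_pos hx]
      rw [ih _ i (by simpa [PySem.List.pySetD_natCast] using hi)]
      simp only [PySem.List.pySetD_natCast, PySem.List.pyGetD_natCast, List.set_set]
      rw [List.getD_eq_getElem _ 0 (by simpa using hi), List.getElem_set_self,
        List.getD_eq_getElem bf 0 hi]
      congr 1
      rw [List.countP_cons]
      simp [hx]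
      ring
    · rw [if_neg hx, ih _ i hi, List.countP_cons]
      simp [hx]

lemma pvBestfood_eq (cklist : List (List Int)) (nfood nfriend : Int) (frdlist : List Int)
    (hn : 0 ≤ nfood) :
    pvBestfood cklist nfood nfriend frdlist
      = (PySem.List.pyRange 0 nfood 1).map (fun i => pvCnt cklist frdlist nfriend i) := by
  unfold pvBestfood
  rw [PySem.List.pyRepeat_singleton]
  have aux : ∀ K : Nat, (K : Int) ≤ nfood →
      (PySem.List.pyRange 0 (K : Int) 1).foldl
        (fun bf i =>
          (PySem.List.pyRange 0 nfriend 1).foldl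
            (fun bf j =>
              if PySem.List.pyGetD (PySem.List.pyGetD cklist j []) i 0 = 1 ∧
                 PySem.List.pyGetD frdlist j 0 = 0
              then PySem.List.pySetD bf i (PySem.List.pyGetD bf i 0 + 1) else bf)
            bf)
        (List.replicate nfood.toNat 0)
      = (PySem.List.pyRange 0 (K : Int) 1).map (fun i => pvCnt cklist frdlist nfriend i)
          ++ List.replicate (nfood.toNat - K) 0 := by
    intro K
    induction K with
    | zero => intro _; simp [PySem.List.pyRange_one_eq_nil]
    | succ K ih =>
      intro hK
      have hK' : (K : Int) ≤ nfood := by push_cast at hK ⊢; omega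
      have hKlt : K < nfood.toNat := by omega
      have hcast : ((K + 1 : Nat) : Int) = (K : Int) + 1 := by push_cast; ring
      rw [hcast, PySem.List.pyRange_one_succ_right (by positivity), List.foldl_append,
        List.map_append, ih hK']
      rw [List.foldl_cons, List.foldl_nil]
      have hlen : K < ((PySem.List.pyRange 0 (K : Int) 1).map
          (fun i => pvCnt cklist frdlist nfriend i) ++ List.replicate (nfood.toNat - K) 0).length := by
        simp [PySem.List.length_pyRange_one]
        omega
      have hmaplen : ((PySem.List.pyRange 0 (K : Int) 1).map
          (fun i => pvCnt cklist frdlist nfriend i)).length = K := by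
        simp [PySem.List.length_pyRange_one]
      rw [incr_loop _ _ _ K hlen]
      have hgd : (((PySem.List.pyRange 0 (K : Int) 1).map (fun i => pvCnt cklist frdlist nfriend i)
          ++ List.replicate (nfood.toNat - K) 0)).getD K 0 = 0 := by
        rw [List.getD_eq_getElem _ 0 hlen, List.getElem_append_right (by omega)]
        simp [hmaplen]
      rw [hgd]
      rw [List.set_append_right _ _ (by omega)]
      have hrep : nfood.toNat - K = (nfood.toNat - (K + 1)) + 1 := by omega
      rw [hmaplen, Nat.sub_self, hrep, List.replicate_succ, List.set_cons_zero]
      simp only [List.map_cons, List.map_nil, zero_add]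
      rw [List.append_assoc]
      rfl
  have := aux nfood.toNat (by omega)
  rw [Int.toNat_of_nonneg hn] at this
  simpa using this

lemma pvCover_unsat (cklist : List (List Int)) (frdlist : List Int) (nfriend i : Int) :
    pvCover cklist i (pvUnsat frdlist nfriend) = pvCnt cklist frdlist nfriend i := by
  unfold pvCover pvUnsat pvCnt
  rw [List.filter_filter, ← List.countP_eq_length_filter]
  congr 1
  apply List.countP_congr
  intro j _
  simp only [Bool.and_eq_true, beq_iff_eq, decide_eq_true_eq]
  try tauto

lemma pvAddFood_char (cklist : List (List Int)) (nfriend foodidx : Int) (frdlist : List Int)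
    (hlf : (frdlist.length : Int) = nfriend) :
    (pvAddFood cklist nfriend foodidx frdlist).length = frdlist.length ∧
    ∀ j : Nat, (pvAddFood cklist nfriend foodidx frdlist).getD j 0
      = if (j : Int) < nfriend
        then frdlist.getD j 0 + PySem.List.pyGetD (PySem.List.pyGetD cklist (j : Int) []) foodidx 0
        else frdlist.getD j 0 := by
  unfold pvAddFood
  have aux : ∀ K : Nat, (K : Int) ≤ nfriend →
      ((PySem.List.pyRange 0 (K : Int) 1).foldl
        (fun fl i => PySem.List.pySetD fl i
          (PySem.List.pyGetD fl i 0 +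
            PySem.List.pyGetD (PySem.List.pyGetD cklist i []) foodidx 0)) frdlist).length
        = frdlist.length ∧
      ∀ j : Nat, ((PySem.List.pyRange 0 (K : Int) 1).foldl
        (fun fl i => PySem.List.pySetD fl i
          (PySem.List.pyGetD fl i 0 +
            PySem.List.pyGetD (PySem.List.pyGetD cklist i []) foodidx 0)) frdlist).getD j 0
        = if j < K
          then frdlist.getD j 0 + PySem.List.pyGetD (PySem.List.pyGetD cklist (j : Int) []) foodidx 0
          else frdlist.getD j 0 := by
    intro K
    induction K with
    | zero => intro _; simp [PySem.List.pyRange_one_eq_nil]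
    | succ K ih =>
      intro hK
      have hK' : (K : Int) ≤ nfriend := by push_cast at hK ⊢; omega
      obtain ⟨ihlen, ihget⟩ := ih hK'
      have hcast : ((K + 1 : Nat) : Int) = (K : Int) + 1 := by push_cast; ring
      rw [hcast, PySem.List.pyRange_one_succ_right (by positivity), List.foldl_append,
        List.foldl_cons, List.foldl_nil]
      have hKlen : K < frdlist.length := by omega
      constructor
      · simp [PySem.List.pySetD_natCast, ihlen]
      · intro j
        simp only [PySem.List.pySetD_natCast, PySem.List.pyGetD_natCast]
        by_cases hj : j = K
        · rw [hj]
          have hset : ∀ (l : List Int) (v : Int), K < l.length → (l.set K v).getD K 0 = v := by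
            intro l v h
            rw [List.getD_eq_getElem _ 0 (by simpa using h)]
            simp
          rw [hset _ _ (by rw [ihlen]; exact hKlen), ihget K]
          simp [List.getD_eq_getElem?_getD]
        · simp only [List.getD_eq_getElem?_getD]
          rw [List.getElem?_set_ne (by omega)]
          rw [← List.getD_eq_getElem?_getD, ihget j, ← List.getD_eq_getElem?_getD]
          by_cases hjK : j < K
          · rw [if_pos hjK, if_pos (by omega)]
            simp [List.getD_eq_getElem?_getD]
          · rw [if_neg hjK, if_neg (by omega)]
  have h := aux nfriend.toNat (by omega)
  have hc : ((nfriend.toNat : Nat) : Int) = nfriend := Int.toNat_of_nonneg (by omega)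
  rw [hc] at h
  obtain ⟨h1, h2⟩ := h
  refine ⟨h1, fun j => ?_⟩
  rw [h2 j]
  by_cases hj : (j : Int) < nfriend
  · rw [if_pos (by omega), if_pos hj]
  · rw [if_neg (by omega), if_neg hj]

lemma ck_entry_01 (cklist : List (List Int)) (nfood nfriend : Int) (hck : CkOK cklist nfood)
    (hlc : (cklist.length : Int) = nfriend) (j f : Int) (hj0 : 0 ≤ j) (hjn : j < nfriend)
    (hf0 : 0 ≤ f) (hfn : f < nfood) :
    PySem.List.pyGetD (PySem.List.pyGetD cklist j []) f 0 = 0 ∨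
    PySem.List.pyGetD (PySem.List.pyGetD cklist j []) f 0 = 1 := by
  have hrow : PySem.List.pyGetD cklist j [] ∈ cklist :=
    PySem.List.pyGetD_mem cklist [] (by constructor <;> omega)
  obtain ⟨hrl, hr01⟩ := hck _ hrow
  have hent : PySem.List.pyGetD (PySem.List.pyGetD cklist j []) f 0 ∈
      PySem.List.pyGetD cklist j [] :=
    PySem.List.pyGetD_mem _ 0 (by constructor <;> omega)
  exact hr01 _ hent

lemma getD_nonneg (fl : List Int) (hfl : ∀ x ∈ fl, 0 ≤ x) (k : Nat) (hk : k < fl.length) :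
    0 ≤ fl.getD k 0 := by
  rw [List.getD_eq_getElem fl 0 hk]
  exact hfl _ (fl.getElem_mem hk)

lemma pvUnsat_addFood (cklist : List (List Int)) (nfood nfriend f : Int) (fl : List Int)
    (hlf : (fl.length : Int) = nfriend) (hlc : (cklist.length : Int) = nfriend)
    (hck : CkOK cklist nfood) (hfl : ∀ x ∈ fl, 0 ≤ x) (hf0 : 0 ≤ f) (hfn : f < nfood) :
    pvUnsat (pvAddFood cklist nfriend f fl) nfriend = pvRemove cklist f (pvUnsat fl nfriend) := by
  unfold pvUnsat pvRemove
  rw [List.filter_filter]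
  apply List.filter_congr
  intro j hjmem
  obtain ⟨hj0, hjn⟩ := PySem.List.mem_pyRange_one.1 hjmem
  obtain ⟨hlen, hget⟩ := pvAddFood_char cklist nfriend f fl hlf
  have hj : j = ((j.toNat : Nat) : Int) := (Int.toNat_of_nonneg hj0).symm
  have hklen : j.toNat < fl.length := by omega
  have haddget : PySem.List.pyGetD (pvAddFood cklist nfriend f fl) j 0
      = PySem.List.pyGetD fl j 0 + PySem.List.pyGetD (PySem.List.pyGetD cklist j []) f 0 := by
    conv_lhs => rw [hj]
    rw [PySem.List.pyGetD_natCast, hget j.toNat, if_pos (by omega)]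
    rw [hj]
    simp only [PySem.List.pyGetD_natCast]
    simp
    have hmax : (max j 0).toNat = j.toNat := by omega
    rw [hmax]
  rw [haddget]
  have ha : 0 ≤ PySem.List.pyGetD fl j 0 := by
    rw [hj, PySem.List.pyGetD_natCast]
    exact getD_nonneg fl hfl _ hklen
  have hc := ck_entry_01 cklist nfood nfriend hck hlc j f hj0 hjn hf0 hfn
  rcases hc with hc | hc <;> rw [hc]
  · simp
  · have h1 : PySem.List.pyGetD fl j 0 + 1 ≠ 0 := by omega
    simp [h1]

lemma pvAddFood_nonneg (cklist : List (List Int)) (nfood nfriend f : Int) (fl : List Int)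
    (hlf : (fl.length : Int) = nfriend) (hlc : (cklist.length : Int) = nfriend)
    (hck : CkOK cklist nfood) (hfl : ∀ x ∈ fl, 0 ≤ x) (hf0 : 0 ≤ f) (hfn : f < nfood) :
    ∀ x ∈ pvAddFood cklist nfriend f fl, 0 ≤ x := by
  obtain ⟨hlen, hget⟩ := pvAddFood_char cklist nfriend f fl hlf
  intro x hx
  obtain ⟨k, hk, rfl⟩ := List.mem_iff_getElem.1 hx
  rw [← List.getD_eq_getElem _ 0 hk, hget k]
  have hkl : k < fl.length := by rw [← hlen]; exact hk
  have ha : 0 ≤ fl.getD k 0 := getD_nonneg fl hfl _ hkl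
  by_cases hkn : (k : Int) < nfriend
  · rw [if_pos hkn]
    have hc := ck_entry_01 cklist nfood nfriend hck hlc (k : Int) f (by omega) hkn hf0 hfn
    rcases hc with hc | hc <;> rw [hc] <;> omega
  · rw [if_neg hkn]; exact ha

lemma Cov_subset (cklist : List (List Int)) (nfood : Int) (S S' : List Int)
    (h : Cov cklist nfood S) (hs : ∀ j ∈ S', j ∈ S) : Cov cklist nfood S' :=
  fun j hj => h j (hs j hj)

lemma cover_add_remove (cklist : List (List Int)) (i : Int) (S : List Int) :
    pvCover cklist i S + ((pvRemove cklist i S).length : Int) = (S.length : Int) := by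
  unfold pvCover pvRemove
  have h := List.length_eq_length_filter_add
    (l := S) (fun j => PySem.List.pyGetD (PySem.List.pyGetD cklist j []) i 0 == 1)
  have he : S.filter (fun j => !(PySem.List.pyGetD (PySem.List.pyGetD cklist j []) i 0 == 1))
      = S.filter (fun j => PySem.List.pyGetD (PySem.List.pyGetD cklist j []) i 0 != 1) := by
    apply List.filter_congr; intro x _; simp [bne]
  rw [← he]
  omega

def pvCounts (cklist : List (List Int)) (nfood : Int) (S : List Int) : List Int :=
  (PySem.List.pyRange 0 nfood 1).map (fun i => pvCover cklist i S)

def pvM (cklist : List (List Int)) (nfood : Int) (S : List Int) : Int :=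
  (PySem.List.max? (pvCounts cklist nfood S) (fun x => x)).getD 0

def pvTies (cklist : List (List Int)) (nfood : Int) (S : List Int) : List Int :=
  (PySem.List.pyRange 0 nfood 1).filter (fun i => pvCover cklist i S == pvM cklist nfood S)

lemma specGo_succ (cklist : List (List Int)) (nfood : Int) (fuel : Nat) (S : List Int) :
    specGo cklist nfood (fuel + 1) S
      = if S = [] then 0
        else (PySem.List.min? ((pvTies cklist nfood S).map
          (fun i => 1 + specGo cklist nfood fuel (pvRemove cklist i S))) (fun x => x)).getD 0 := by
  simp only [specGo, pvTies, pvM, pvCounts]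

lemma pvM_exists (cklist : List (List Int)) (nfood : Int) (S : List Int) (h1n : 1 ≤ nfood) :
    PySem.List.max? (pvCounts cklist nfood S) (fun x => x) = some (pvM cklist nfood S) := by
  cases h : PySem.List.max? (pvCounts cklist nfood S) (fun x => x) with
  | none =>
    exfalso
    have := (PySem.List.max?_eq_none_iff _ _).1 h
    have hlen : (pvCounts cklist nfood S).length = nfood.toNat := by
      simp [pvCounts, PySem.List.length_pyRange_one]
    rw [this] at hlen
    simp at hlen
    omega
  | some mv => simp [pvM, h]

lemma pvM_ge (cklist : List (List Int)) (nfood : Int) (S : List Int) (i : Int)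
    (h1n : 1 ≤ nfood) (hi0 : 0 ≤ i) (hin : i < nfood) :
    pvCover cklist i S ≤ pvM cklist nfood S := by
  have hmax := pvM_exists cklist nfood S h1n
  apply PySem.List.max?_isMax hmax
  exact List.mem_map.2 ⟨i, PySem.List.mem_pyRange_one.2 ⟨hi0, hin⟩, rfl⟩

lemma pvM_pos (cklist : List (List Int)) (nfood : Int) (S : List Int)
    (h1n : 1 ≤ nfood) (hcov : Cov cklist nfood S) (hS : S ≠ []) :
    1 ≤ pvM cklist nfood S := by
  obtain ⟨j, hj⟩ := List.exists_mem_of_ne_nil S hS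
  obtain ⟨i, hi0, hin, hi1⟩ := hcov j hj
  have hjf : j ∈ S.filter (fun j =>
      PySem.List.pyGetD (PySem.List.pyGetD cklist j []) i 0 == 1) :=
    List.mem_filter.2 ⟨hj, by simp [hi1]⟩
  have h1 : 1 ≤ pvCover cklist i S := by
    unfold pvCover
    have := List.length_pos_of_mem hjf
    omega
  exact le_trans h1 (pvM_ge cklist nfood S i h1n hi0 hin)

lemma pvTies_ne_nil (cklist : List (List Int)) (nfood : Int) (S : List Int) (h1n : 1 ≤ nfood) :
    pvTies cklist nfood S ≠ [] := by
  have hmax := pvM_exists cklist nfood S h1n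
  have hmem := PySem.List.max?_mem hmax
  obtain ⟨i, hi, hieq⟩ := List.mem_map.1 hmem
  apply List.ne_nil_of_mem (a := i)
  exact List.mem_filter.2 ⟨hi, by simp [hieq]⟩

lemma mem_pvTies (cklist : List (List Int)) (nfood : Int) (S : List Int) (i : Int)
    (hi : i ∈ pvTies cklist nfood S) :
    (0 ≤ i ∧ i < nfood) ∧ pvCover cklist i S = pvM cklist nfood S := by
  obtain ⟨hmem, heq⟩ := List.mem_filter.1 hi
  exact ⟨PySem.List.mem_pyRange_one.1 hmem, by simpa using heq⟩

lemma pvRemove_subset (cklist : List (List Int)) (i : Int) (S : List Int) :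
    ∀ j ∈ pvRemove cklist i S, j ∈ S := by
  intro j hj
  exact List.mem_of_mem_filter hj

lemma length_pvRemove_lt (cklist : List (List Int)) (nfood : Int) (S : List Int) (i : Int)
    (h1n : 1 ≤ nfood) (hcov : Cov cklist nfood S) (hS : S ≠ [])
    (hi : i ∈ pvTies cklist nfood S) :
    (pvRemove cklist i S).length < S.length := by
  have h := cover_add_remove cklist i S
  have hm := (mem_pvTies cklist nfood S i hi).2
  have hp := pvM_pos cklist nfood S h1n hcov hS
  omega

lemma specGo_le (cklist : List (List Int)) (nfood : Int) (h1n : 1 ≤ nfood) :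
    ∀ (fuel : Nat) (S : List Int), Cov cklist nfood S → S.length < fuel →
      specGo cklist nfood fuel S ≤ (S.length : Int) := by
  intro fuel
  induction fuel with
  | zero => intro S _ h; omega
  | succ fuel ih =>
    intro S hcov hlen
    rw [specGo_succ]
    by_cases hS : S = []
    · simp [hS]
    · rw [if_neg hS]
      have htne := pvTies_ne_nil cklist nfood S h1n
      obtain ⟨i0, hi0⟩ := List.exists_mem_of_ne_nil _ htne
      have hvne : (pvTies cklist nfood S).map
          (fun i => 1 + specGo cklist nfood fuel (pvRemove cklist i S)) ≠ [] := by
        simp [htne]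
      obtain ⟨v, hv⟩ : ∃ v, PySem.List.min? ((pvTies cklist nfood S).map
          (fun i => 1 + specGo cklist nfood fuel (pvRemove cklist i S))) (fun x => x) = some v := by
        cases hmin : PySem.List.min? ((pvTies cklist nfood S).map
            (fun i => 1 + specGo cklist nfood fuel (pvRemove cklist i S))) (fun x => x) with
        | none => exact absurd ((PySem.List.min?_eq_none_iff _ _).1 hmin) hvne
        | some v => exact ⟨v, rfl⟩
      rw [hv, Option.getD_some]
      have hd := length_pvRemove_lt cklist nfood S i0 h1n hcov hS hi0
      have hsub := pvRemove_subset cklist i0 S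
      have hrec := ih (pvRemove cklist i0 S) (Cov_subset cklist nfood S _ hcov hsub) (by omega)
      have helem : 1 + specGo cklist nfood fuel (pvRemove cklist i0 S) ∈
          (pvTies cklist nfood S).map
            (fun i => 1 + specGo cklist nfood fuel (pvRemove cklist i S)) :=
        List.mem_map.2 ⟨i0, hi0, rfl⟩
      have := PySem.List.min?_isMin hv _ helem
      simp only at this
      omega

lemma specGo_mono (cklist : List (List Int)) (nfood : Int) (h1n : 1 ≤ nfood) :
    ∀ (fuel fuel' : Nat) (S : List Int), Cov cklist nfood S →
      S.length < fuel → S.length < fuel' →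
      specGo cklist nfood fuel S = specGo cklist nfood fuel' S := by
  intro fuel
  induction fuel with
  | zero => intro fuel' S _ h _; omega
  | succ fuel ih =>
    intro fuel' S hcov hlen hlen'
    cases fuel' with
    | zero => omega
    | succ fuel' =>
      rw [specGo_succ, specGo_succ]
      by_cases hS : S = []
      · simp [hS]
      · rw [if_neg hS, if_neg hS]
        congr 2
        apply List.map_congr_left
        intro i hi
        have hd := length_pvRemove_lt cklist nfood S i h1n hcov hS hi
        have hcov' := Cov_subset cklist nfood S _ hcov (pvRemove_subset cklist i S)
        rw [ih fuel' (pvRemove cklist i S) hcov' (by omega) (by omega)]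

def pvInv (cklist : List (List Int)) (nfood nfriend : Int) (fl : List Int) : Prop :=
  (fl.length : Int) = nfriend ∧ (cklist.length : Int) = nfriend ∧ 1 ≤ nfood ∧
  (∀ x ∈ fl, 0 ≤ x) ∧ CkOK cklist nfood ∧ Cov cklist nfood (pvUnsat fl nfriend) ∧
  (pvUnsat fl nfriend).length ≤ 9998

lemma filterMap_if_eq_filter (l : List Int) (p : Int → Prop) [DecidablePred p] :
    l.filterMap (fun a => if p a then some a else none) = l.filter (fun a => decide (p a)) := by
  induction l with
  | nil => simp
  | cons a l ih =>
    simp only [List.filterMap_cons, List.filter_cons]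
    by_cases hp : p a <;> simp [hp, ih]

lemma checkfoodGo_eq_specGo (cklist : List (List Int)) (nfood nfriend : Int) :
    ∀ (fuel : Nat) (fl : List Int), pvInv cklist nfood nfriend fl →
      (pvUnsat fl nfriend).length < fuel →
      checkfoodGo cklist nfood nfriend fuel fl
        = specGo cklist nfood fuel (pvUnsat fl nfriend) := by
  intro fuel
  induction fuel with
  | zero => intro fl _ h; omega
  | succ fuel ih =>
    intro fl hinv hlen
    obtain ⟨hlf, hlc, h1n, hfl0, hck, hcov, hbnd⟩ := hinv
    by_cases hS : pvUnsat fl nfriend = []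
    · have hall : ∀ f ∈ fl, f ≠ 0 := (pvUnsat_eq_nil_iff fl nfriend hlf).1 hS
      have hflag : pvFlagA fl = true := by
        rw [pvFlagA_eq]
        simp only [List.all_eq_true]
        intro f hf
        simpa using hall f hf
      rw [show checkfoodGo cklist nfood nfriend (fuel+1) fl = 0 by
        simp [checkfoodGo, hflag]]
      rw [specGo_succ, if_pos hS]
    · -- some friend is unsatisfied
      obtain ⟨j, hj⟩ := List.exists_mem_of_ne_nil _ hS
      obtain ⟨hjr, hj0⟩ := List.mem_filter.1 hj
      obtain ⟨hj0', hjn⟩ := PySem.List.mem_pyRange_one.1 hjr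
      have hzel : (0 : Int) ∈ fl := by
        have hmem : PySem.List.pyGetD fl j 0 ∈ fl :=
          PySem.List.pyGetD_mem fl 0 (by constructor <;> omega)
        have : PySem.List.pyGetD fl j 0 = 0 := by simpa using hj0
        rwa [this] at hmem
      have hflag : pvFlagA fl = false := by
        rw [pvFlagA_eq]
        apply List.all_eq_false.2
        exact ⟨0, hzel, by simp⟩
      have hbest : pvBestfood cklist nfood nfriend fl
          = pvCounts cklist nfood (pvUnsat fl nfriend) := by
        rw [pvBestfood_eq cklist nfood nfriend fl (by omega)]
        unfold pvCounts
        apply List.map_congr_left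
        intro i _
        rw [← pvCover_unsat]
      have hlenc : PySem.List.len (pvCounts cklist nfood (pvUnsat fl nfriend)) = nfood := by
        simp [PySem.List.len_eq, pvCounts, PySem.List.length_pyRange_one]
        omega
      have hmaxv : ((PySem.List.max? (PySem.List.enumerate
            (pvCounts cklist nfood (pvUnsat fl nfriend))) (fun p => p.2)).map
            (fun p => p.2)).getD 0 = pvM cklist nfood (pvUnsat fl nfriend) := by
        rw [max?_enumerate_snd]
        rfl
      have hsel : (PySem.List.enumerate (pvCounts cklist nfood (pvUnsat fl nfriend))).filterMap
            (fun p => if p.2 = pvM cklist nfood (pvUnsat fl nfriend) then some p.1 else none)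
          = pvTies cklist nfood (pvUnsat fl nfriend) := by
        rw [PySem.List.enumerate_eq_map_pyRange _ 0, List.filterMap_map, hlenc]
        have hcomp : ((fun p : Int × Int =>
              if p.2 = pvM cklist nfood (pvUnsat fl nfriend) then some p.1 else none) ∘
              (fun j => (j, PySem.List.pyGetD (pvCounts cklist nfood (pvUnsat fl nfriend)) j 0)))
            = fun j => if PySem.List.pyGetD (pvCounts cklist nfood (pvUnsat fl nfriend)) j 0
                = pvM cklist nfood (pvUnsat fl nfriend) then some j else none := rfl
        rw [hcomp, filterMap_if_eq_filter]
        unfold pvTies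
        apply List.filter_congr
        intro i hir
        obtain ⟨hi0, hin⟩ := PySem.List.mem_pyRange_one.1 hir
        unfold pvCounts
        rw [PySem.List.pyGetD_map_pyRange_of_nonneg _ _ _ _ hi0 hin]
        rw [Bool.beq_eq_decide_eq]
      -- rewrite the recursive calls on each selected food
      have hrec : ∀ i ∈ pvTies cklist nfood (pvUnsat fl nfriend),
          checkfoodGo cklist nfood nfriend fuel (pvAddFood cklist nfriend i fl)
            = specGo cklist nfood fuel (pvRemove cklist i (pvUnsat fl nfriend)) := by
        intro i hi
        obtain ⟨⟨hi0, hin⟩, hicov⟩ := mem_pvTies cklist nfood (pvUnsat fl nfriend) i hi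
        have hchild := pvUnsat_addFood cklist nfood nfriend i fl hlf hlc hck hfl0 hi0 hin
        have hdlt := length_pvRemove_lt cklist nfood (pvUnsat fl nfriend) i h1n hcov hS hi
        have hcov' := Cov_subset cklist nfood _ _ hcov (pvRemove_subset cklist i _)
        have hinv' : pvInv cklist nfood nfriend (pvAddFood cklist nfriend i fl) := by
          refine ⟨?_, hlc, h1n, ?_, hck, ?_, ?_⟩
          · rw [(pvAddFood_char cklist nfriend i fl hlf).1, hlf]
          · exact pvAddFood_nonneg cklist nfood nfriend i fl hlf hlc hck hfl0 hi0 hin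
          · rw [hchild]; exact hcov'
          · rw [hchild]; omega
        rw [ih _ hinv' (by rw [hchild]; omega), hchild]
      -- both sides now fold the same values
      have hvalsle : ∀ i ∈ pvTies cklist nfood (pvUnsat fl nfriend),
          1 + specGo cklist nfood fuel (pvRemove cklist i (pvUnsat fl nfriend))
            ≤ ((pvUnsat fl nfriend).length : Int) := by
        intro i hi
        have hdlt := length_pvRemove_lt cklist nfood (pvUnsat fl nfriend) i h1n hcov hS hi
        have hcov' := Cov_subset cklist nfood _ _ hcov (pvRemove_subset cklist i _)
        have := specGo_le cklist nfood h1n fuel _ hcov' (by omega)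
        omega
      rw [specGo_succ, if_neg hS]
      simp only [checkfoodGo, hflag, Bool.false_eq_true, if_false]
      rw [hbest, hmaxv, hsel]
      rw [PySem.List.foldl_congr_mem _ _
        (fun ret foodidx => min ret (1 + specGo cklist nfood fuel
          (pvRemove cklist foodidx (pvUnsat fl nfriend)))) 9999
        (by intro acc i hi; rw [hrec i hi])]
      rw [show (fun (ret : Int) (foodidx : Int) => min ret (1 + specGo cklist nfood fuel
          (pvRemove cklist foodidx (pvUnsat fl nfriend))))
        = (fun (x : Int) (y : Int) => min x ((fun i => 1 + specGo cklist nfood fuel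
          (pvRemove cklist i (pvUnsat fl nfriend))) y)) from rfl, ← List.foldl_map]
      cases hvals : (pvTies cklist nfood (pvUnsat fl nfriend)).map
          (fun i => 1 + specGo cklist nfood fuel (pvRemove cklist i (pvUnsat fl nfriend))) with
      | nil =>
        exfalso
        exact pvTies_ne_nil cklist nfood (pvUnsat fl nfriend) h1n (List.map_eq_nil_iff.1 hvals)
      | cons v vs =>
        rw [PySem.List.min?_id_cons, Option.getD_some, List.foldl_cons]
        have hv : v ≤ 9998 := by
          have hvmem : v ∈ (pvTies cklist nfood (pvUnsat fl nfriend)).map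
              (fun i => 1 + specGo cklist nfood fuel (pvRemove cklist i (pvUnsat fl nfriend))) := by
            rw [hvals]; exact List.mem_cons_self ..
          obtain ⟨i, hi, hieq⟩ := List.mem_map.1 hvmem
          have := hvalsle i hi
          omega
        rw [min_eq_right (by omega)]

def CacheOK (cklist : List (List Int)) (nfood : Int) (c : PySem.Dict (List Int) Int) : Prop :=
  ∀ (S : List Int) (v : Int), c.get? S = some v → Cov cklist nfood S →
    v = specGo cklist nfood (S.length + 1) S

lemma ties_inline_eq (cklist : List (List Int)) (nfood : Int) (S : List Int) :
    (PySem.List.pyRange 0 nfood 1).filter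
      (fun i => PySem.List.pyGetD ((PySem.List.pyRange 0 nfood 1).map
          (fun i => pvCover cklist i S)) i 0
        == (PySem.List.max? ((PySem.List.pyRange 0 nfood 1).map
          (fun i => pvCover cklist i S)) (fun x => x)).getD 0)
    = pvTies cklist nfood S := by
  unfold pvTies
  apply List.filter_congr
  intro i hir
  obtain ⟨hi0, hin⟩ := PySem.List.mem_pyRange_one.1 hir
  rw [PySem.List.pyGetD_map_pyRange_of_nonneg _ _ _ _ hi0 hin]
  rfl

lemma solveGo_eq (cklist : List (List Int)) (nfood : Int) (h1n : 1 ≤ nfood) :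
    ∀ (fuel : Nat) (c : PySem.Dict (List Int) Int) (S : List Int),
      CacheOK cklist nfood c → Cov cklist nfood S → S.length < fuel →
      (solveGo cklist nfood fuel c S).1 = specGo cklist nfood fuel S ∧
      CacheOK cklist nfood (solveGo cklist nfood fuel c S).2 := by
  intro fuel
  induction fuel with
  | zero => intro c S _ _ h; omega
  | succ fuel ih =>
    intro c S hc hcov hlen
    by_cases hS : S = []
    · constructor
      · simp only [solveGo, if_pos hS]
        rw [specGo_succ, if_pos hS]
      · simp only [solveGo, if_pos hS]
        exact hc
    · cases hget : c.get? S with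
      | some v =>
        have hv := hc S v hget hcov
        constructor
        · simp only [solveGo, if_neg hS, hget]
          rw [hv]
          exact specGo_mono cklist nfood h1n _ _ S hcov (by omega) (by omega)
        · simp only [solveGo, if_neg hS, hget]
          exact hc
      | none =>
        have hchild : ∀ i ∈ pvTies cklist nfood S,
            Cov cklist nfood (pvRemove cklist i S) ∧
            (pvRemove cklist i S).length < fuel := by
          intro i hi
          have hdlt := length_pvRemove_lt cklist nfood S i h1n hcov hS hi
          exact ⟨Cov_subset cklist nfood _ _ hcov (pvRemove_subset cklist i _), by omega⟩
        have hfold : ∀ (l : List Int), (∀ i ∈ l, i ∈ pvTies cklist nfood S) →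
            ∀ (acc : List Int) (c' : PySem.Dict (List Int) Int), CacheOK cklist nfood c' →
            (l.foldl (fun (acc : List Int × PySem.Dict (List Int) Int) i =>
                let r := solveGo cklist nfood fuel acc.2 (pvRemove cklist i S)
                (acc.1 ++ [1 + r.1], r.2)) (acc, c')).1
              = acc ++ l.map (fun i => 1 + specGo cklist nfood fuel (pvRemove cklist i S)) ∧
            CacheOK cklist nfood
              (l.foldl (fun (acc : List Int × PySem.Dict (List Int) Int) i =>
                let r := solveGo cklist nfood fuel acc.2 (pvRemove cklist i S)
                (acc.1 ++ [1 + r.1], r.2)) (acc, c')).2 := by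
          intro l
          induction l with
          | nil => intro _ acc c' hc'; simp [hc']
          | cons i l ihl =>
            intro hmem acc c' hc'
            have hi := hmem i (List.mem_cons_self ..)
            obtain ⟨hcov', hlen'⟩ := hchild i hi
            obtain ⟨hr1, hr2⟩ := ih c' (pvRemove cklist i S) hc' hcov' hlen'
            rw [List.foldl_cons]
            simp only
            rw [hr1]
            obtain ⟨ha, hb⟩ := ihl (fun x hx => hmem x (List.mem_cons_of_mem _ hx))
              (acc ++ [1 + specGo cklist nfood fuel (pvRemove cklist i S)])
              (solveGo cklist nfood fuel c' (pvRemove cklist i S)).2 hr2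
            refine ⟨?_, hb⟩
            rw [ha]
            simp
        obtain ⟨hf1, hf2⟩ := hfold (pvTies cklist nfood S) (fun i hi => hi) [] c hc
        have hret : (PySem.List.min? (((pvTies cklist nfood S).map
              (fun i => 1 + specGo cklist nfood fuel (pvRemove cklist i S)))) (fun x => x)).getD 0
            = specGo cklist nfood (fuel + 1) S := by
          rw [specGo_succ, if_neg hS]
        constructor
        · simp only [solveGo, if_neg hS, hget, ties_inline_eq]
          rw [hf1]
          simp only [List.nil_append]
          exact hret
        · simp only [solveGo, if_neg hS, hget, ties_inline_eq]
          intro S' v' hget' hcov'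
          by_cases hSS : S' = S
          · rw [hSS] at hget' ⊢
            rw [PySem.Dict.get?_insert_self] at hget'
            injection hget' with hv'
            rw [← hv', hf1]
            simp only [List.nil_append]
            rw [hret]
            exact specGo_mono cklist nfood h1n _ _ S hcov (by omega) (by omega)
          · rw [PySem.Dict.get?_insert_of_ne _ _ hSS] at hget'
            exact hf2 S' v' hget' hcov'


-- ===== VERDICT (by name: the statement is the Claim_ definition above) =====
lemma Cov_of_zip (cklist : List (List Int)) (nfood nfriend : Int) (fl : List Int)
    (hlf : (fl.length : Int) = nfriend) (hlc : (cklist.length : Int) = nfriend)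
    (hck : CkOK cklist nfood)
    (hzip : ∀ p ∈ fl.zip cklist, p.1 = 0 → (1 : Int) ∈ p.2) :
    Cov cklist nfood (pvUnsat fl nfriend) := by
  intro j hj
  obtain ⟨hjr, hj0⟩ := List.mem_filter.1 hj
  obtain ⟨hj0', hjn⟩ := PySem.List.mem_pyRange_one.1 hjr
  have hjf : j.toNat < fl.length := by omega
  have hjc : j.toNat < cklist.length := by omega
  have hjz : j.toNat < (fl.zip cklist).length := by
    rw [List.length_zip]; omega
  have hpz : (fl[j.toNat], cklist[j.toNat]) ∈ fl.zip cklist := by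
    have := List.getElem_mem hjz
    rwa [List.getElem_zip] at this
  have hfle : fl[j.toNat] = 0 := by
    have : PySem.List.pyGetD fl j 0 = 0 := by simpa using hj0
    have hj' : j = ((j.toNat : Nat) : Int) := by omega
    rw [hj', PySem.List.pyGetD_natCast, List.getD_eq_getElem fl 0 hjf] at this
    exact this
  have h1 : (1 : Int) ∈ cklist[j.toNat] := hzip _ hpz hfle
  obtain ⟨k, hk, hke⟩ := List.mem_iff_getElem.1 h1
  have hrow : PySem.List.pyGetD cklist j [] = cklist[j.toNat] := by
    have hj' : j = ((j.toNat : Nat) : Int) := by omega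
    conv_lhs => rw [hj']
    rw [PySem.List.pyGetD_natCast, List.getD_eq_getElem cklist [] hjc]
  have hrl := (hck _ (List.getElem_mem hjc)).1
  refine ⟨(k : Int), by omega, by omega, ?_⟩
  rw [hrow, PySem.List.pyGetD_natCast, List.getD_eq_getElem _ 0 hk]
  exact hke

lemma cacheOK_empty (cklist : List (List Int)) (nfood : Int) :
    CacheOK cklist nfood PySem.Dict.empty := by
  intro S v hget _
  rw [PySem.Dict.get?_empty] at hget
  exact absurd hget (by simp)

theorem checkfood_spec : Claim_equal_checkfood := by
  intro fl ck n nfr _ hpre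
  unfold Spec_checkfood checkfood checkfood_alt
  by_cases hall : ∀ f ∈ fl, f ≠ 0
  · have hflag : pvFlagA fl = true := by
      rw [pvFlagA_eq]
      simp only [List.all_eq_true]
      intro f hf
      simpa using hall f hf
    have hcount : fl.countP (fun f => f == 0) = 0 :=
      List.countP_eq_zero.2 (by intro f hf; simpa using hall f hf)
    have hB : fl.all (fun f => f != 0) = true := by
      simp only [List.all_eq_true]
      intro f hf
      simpa using hall f hf
    rw [if_pos hB, hcount]
    simp [checkfoodGo, hflag]
  · rcases hpre with h | ⟨hlf, hlc, h1n, hfl0, hckP, hzip, hbnd⟩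
    · exact absurd h hall
    · have hck : CkOK ck n := hckP
      have hcov := Cov_of_zip ck n nfr fl hlf hlc hck hzip
      have hSlen : (pvUnsat fl nfr).length = fl.countP (fun f => f == 0) :=
        length_pvUnsat fl nfr hlf
      have hB : ¬ (fl.all (fun f => f != 0) = true) := by
        simp only [List.all_eq_true]
        intro hc
        exact hall (fun f hf => by simpa using hc f hf)
      rw [if_neg hB]
      have hinv : pvInv ck n nfr fl := ⟨hlf, hlc, h1n, hfl0, hck, hcov, by omega⟩
      have hmainA := checkfoodGo_eq_specGo ck n nfr (fl.countP (fun f => f == 0) + 1) fl hinv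
        (by omega)
      have hmainB := solveGo_eq ck n h1n ((pvUnsat fl nfr).length + 1) PySem.Dict.empty
        (pvUnsat fl nfr) (cacheOK_empty ck n) hcov (by omega)
      rw [hmainA, hmainB.1, hSlen]
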